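-- pv_equiv track=rewrite | github.com/ksomemo/Competitive-programming | atcoder/abc/099/C.py | editorial_pdf
-- ===== SOURCE A (Python) =====
-- def editorial_pdf(N):
--     """
--     https://twitter.com/chokudai/status/1005820807472242688
--
--     6^p * 6 == 6^(p+1)
--     N円のうち、6系と9系で払う金額の組合せを考える
--         i円を6系
--         N-iを9系
--     """
--     ans = N
--     for i in range(N+1):
--         cc, t = 0, i
--         while t > 0:
--             """
--             この方法で、6^1以上のべき乗で表せない数値から払っていることになる
--             他の方法: https://beta.atcoder.jp/contests/abc099/submissions/2648032
--
--             e.g: 36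
--             36 % 6 == 0, 36 // 6 == 6
--              6 % 6 == 0,  6 // 6 == 1
--              1 % 6 == 1,  1 // 6 == 0
--
--             e.g: 51
--                 3: 1 * 6^2 + 2 * 6^1 + 3 * 6^0
--                 2: 1 * 6^1 + 2 * 6^0
--                 1: 1 * 6^0
--             51 % 6 == 3, 51 // 6 == 8
--              8 % 6 == 2,  8 // 6 == 1
--              1 % 6 == 1,  1 // 6 == 0
--             """
--             cc += t % 6
--             t //= 6
--
--         t = N - i
--         while t > 0:
--             cc += t % 9
--             t //= 9
--
--         ans = min(ans, cc)
--
--     return ans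
-- ===== SOURCE B (Python) =====
-- def editorial_pdf(N):
--     # Tabulate base-6 and base-9 digit sums once (s[n] = n % b + s[n // b]),
--     # then take the best split as a single min over pairwise sums.
--     s6 = [0] * (N + 1)
--     s9 = [0] * (N + 1)
--     for n in range(1, N + 1):
--         s6[n] = n % 6 + s6[n // 6]
--         s9[n] = n % 9 + s9[n // 9]
--     return min(a + b for a, b in zip(s6, reversed(s9)))
-- ===== Notes on version B (the rewrite author's own statement) =====
-- stated objective: faster
-- what changed: Instead of recomputing each digit sum with div/mod while-loops inside the split scan, B tabulates all base-6 and base-9 digit sums bottom-up (s[n] = n%b + s[n//b]) and takes the answer as one min over the zip of the s6 table with the reversed s9 table.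
-- outside the precondition, e.g. on editorial_pdf(-1): A returns -1, B raises ValueError
import Mathlib
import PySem

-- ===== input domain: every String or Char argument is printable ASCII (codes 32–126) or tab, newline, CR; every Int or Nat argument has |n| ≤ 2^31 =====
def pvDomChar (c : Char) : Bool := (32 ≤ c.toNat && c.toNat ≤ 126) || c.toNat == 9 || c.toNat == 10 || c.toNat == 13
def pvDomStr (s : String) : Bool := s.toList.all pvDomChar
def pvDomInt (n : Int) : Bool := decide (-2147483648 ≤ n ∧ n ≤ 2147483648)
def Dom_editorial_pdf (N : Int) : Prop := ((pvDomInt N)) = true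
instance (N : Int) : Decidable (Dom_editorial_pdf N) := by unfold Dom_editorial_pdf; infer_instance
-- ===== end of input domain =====

-- B replaces A's per-split digit-sum while-loops by two bottom-up digit-sum tables and one min pass.

-- ===== PORT A =====
-- `while t > 0: cc += t % 6; t //= 6`
def digitLoop6 (cc t : Int) : Int :=
  if _h : 0 < t then digitLoop6 (cc + PySem.Int.mod t 6) (PySem.Int.floordiv t 6) else cc
termination_by t.toNat
decreasing_by simp only [PySem.Int.floordiv_eq_ediv_of_pos (by omega : (0:Int) < 6)]; omega

-- `while t > 0: cc += t % 9; t //= 9`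
def digitLoop9 (cc t : Int) : Int :=
  if _h : 0 < t then digitLoop9 (cc + PySem.Int.mod t 9) (PySem.Int.floordiv t 9) else cc
termination_by t.toNat
decreasing_by simp only [PySem.Int.floordiv_eq_ediv_of_pos (by omega : (0:Int) < 9)]; omega

def editorial_pdf (N : Int) : Int :=
  (PySem.List.pyRange 0 (N + 1) 1).foldl (fun ans i =>
    let cc := digitLoop6 0 i
    let cc := digitLoop9 cc (N - i)
    min ans cc) N

-- ===== PORT B =====
def editorial_pdf_alt (N : Int) : Int :=
  let s6 : List Int := List.replicate (N + 1).toNat 0   -- [0] * (N + 1)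
  let s9 : List Int := List.replicate (N + 1).toNat 0
  let st := (PySem.List.pyRange 1 (N + 1) 1).foldl (fun (st : List Int × List Int) n =>
      (PySem.List.pySetD st.1 n
        (PySem.Int.mod n 6 + PySem.List.pyGetD st.1 (PySem.Int.floordiv n 6) 0),
       PySem.List.pySetD st.2 n
        (PySem.Int.mod n 9 + PySem.List.pyGetD st.2 (PySem.Int.floordiv n 9) 0)))
    (s6, s9)
  -- min(a + b for a, b in zip(s6, reversed(s9))): none = ValueError on the empty list, excluded by Pre_
  match PySem.List.min? ((st.1.zip st.2.reverse).map (fun ab => ab.1 + ab.2)) (fun x => x) with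
  | some m => m
  | none => 0

-- ===== PRECONDITION & SPEC =====
-- Pre_ restricts to the natural domain 0 ≤ N (an amount to pay): for N < 0 the Python A returns
-- its untouched seed N (its loop is empty) while B's min() of an empty sequence raises ValueError.
def Pre_editorial_pdf (N : Int) : Prop := 0 ≤ N
instance (N : Int) : Decidable (Pre_editorial_pdf N) := by unfold Pre_editorial_pdf; infer_instance
def pvWitness_editorial_pdf : Int := (51)
def Spec_editorial_pdf (N : Int) (out : Int) : Prop := out = editorial_pdf_alt N
instance (N : Int) (out : Int) : Decidable (Spec_editorial_pdf N out) := by unfold Spec_editorial_pdf; infer_instance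

-- ===== CLAIM (what is proved, stated in full; the proofs are below) =====
def Claim_equal_editorial_pdf : Prop := ∀ (N : Int), Dom_editorial_pdf N → Pre_editorial_pdf N → Spec_editorial_pdf N (editorial_pdf N)

-- ===== LEMMAS AND PROOFS =====

def dsum (b n : ℕ) : ℕ :=
  if h : 2 ≤ b ∧ 0 < n then n % b + dsum b (n / b) else 0
termination_by n
decreasing_by exact Nat.div_lt_self h.2 h.1

lemma dsum_zero (b : ℕ) : dsum b 0 = 0 := by rw [dsum]; simp

lemma dsum_pos (b n : ℕ) (hb : 2 ≤ b) (hn : 0 < n) : dsum b n = n % b + dsum b (n / b) := by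
  rw [dsum]; simp [hb, hn]

lemma dsum_le (b n : ℕ) (hb : 2 ≤ b) : dsum b n ≤ n := by
  induction n using Nat.strong_induction_on with
  | _ n ih =>
    rcases Nat.eq_zero_or_pos n with h | h
    · simp [h, dsum_zero]
    · rw [dsum_pos b n hb h]
      have h1 := ih (n / b) (Nat.div_lt_self h hb)
      have h2 := Nat.mod_add_div n b
      have h4 : n / b ≤ b * (n / b) := Nat.le_mul_of_pos_left _ (by omega)
      omega

-- the filled digit-sum table after processing 1..m
def tbl (b L m : ℕ) : List Int := (List.range L).map (fun k => if k ≤ m then ((dsum b k : ℕ) : Int) else 0)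

lemma tbl_zero (b L : ℕ) : tbl b L 0 = List.replicate L 0 := by
  rw [List.eq_replicate_iff]
  constructor
  · simp [tbl]
  · intro x hx
    simp only [tbl, List.mem_map] at hx
    obtain ⟨k, _, rfl⟩ := hx
    by_cases h : k ≤ 0
    · have : k = 0 := by omega
      simp [this, dsum_zero]
    · simp [h]

lemma tbl_step (b L m : ℕ) (hb : 2 ≤ b) (h : m + 1 < L) :
    PySem.List.pySetD (tbl b L m) ((m + 1 : ℕ) : Int)
      (PySem.Int.mod ((m + 1 : ℕ) : Int) ((b : ℕ) : Int) +
        PySem.List.pyGetD (tbl b L m) (PySem.Int.floordiv ((m + 1 : ℕ) : Int) ((b : ℕ) : Int)) 0)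
      = tbl b L (m + 1) := by
  rw [PySem.Int.mod_natCast, PySem.Int.floordiv_natCast, PySem.List.pyGetD_natCast,
      PySem.List.pySetD_natCast]
  have hdivlt : (m + 1) / b < m + 1 := Nat.div_lt_self (by omega) hb
  rw [show tbl b L m = (List.range L).map (fun k => if k ≤ m then ((dsum b k : ℕ) : Int) else 0) from rfl]
  rw [PySem.List.getD_map_range _ _ _ _ (by omega)]
  rw [if_pos (by omega : (m+1)/b ≤ m)]
  apply List.ext_getElem
  · simp [tbl]
  · intro i hi1 hi2
    simp only [tbl, List.length_map, List.length_range] at hi2 ⊢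
    rw [List.getElem_set]
    simp only [List.getElem_map, List.getElem_range]
    by_cases hcase : m + 1 = i
    · subst hcase
      rw [if_pos rfl, if_pos (le_refl _)]
      rw [dsum_pos b (m+1) hb (by omega)]
      push_cast
      ring
    · rw [if_neg hcase]
      by_cases hle : i ≤ m
      · rw [if_pos hle, if_pos (by omega)]
      · rw [if_neg hle, if_neg (by omega)]

-- table fold invariant
lemma fold_tbl (b : ℕ) (hb : 2 ≤ b) (L M : ℕ) (hM : M < L) :
    (PySem.List.pyRange 1 ((M : ℕ) + 1) 1).foldl
      (fun s n => PySem.List.pySetD s n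
        (PySem.Int.mod n ((b : ℕ) : Int) + PySem.List.pyGetD s (PySem.Int.floordiv n ((b : ℕ) : Int)) 0))
      (List.replicate L (0 : Int)) = tbl b L M := by
  induction M with
  | zero =>
    rw [show ((0:ℕ):Int) + 1 = 1 by norm_num, PySem.List.pyRange_one_eq_nil (le_refl 1)]
    simp [tbl_zero]
  | succ m ih =>
    have hcast : ((m + 1 : ℕ) : Int) + 1 = (((m : ℕ) : Int) + 1) + 1 := by push_cast; ring
    rw [hcast, PySem.List.pyRange_one_succ_right (by omega), List.foldl_append]
    rw [ih (by omega)]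
    simp only [List.foldl_cons, List.foldl_nil]
    rw [show ((m:ℕ):Int) + 1 = ((m + 1 : ℕ) : Int) by push_cast; ring]
    exact tbl_step b L m hb (by omega)

lemma digitLoop6_eq (t cc : Int) (ht : 0 ≤ t) : digitLoop6 cc t = cc + dsum 6 t.toNat := by
  generalize hn : t.toNat = n
  induction n using Nat.strong_induction_on generalizing t cc with
  | _ n ih =>
    rw [digitLoop6]
    by_cases h : 0 < t
    · rw [dif_pos h]
      rw [PySem.Int.mod_eq_emod_of_pos (by omega : (0:Int) < 6),
          PySem.Int.floordiv_eq_ediv_of_pos (by omega : (0:Int) < 6)]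
      rw [ih ((t / 6).toNat) (by omega) _ _ (by omega) rfl]
      have h1 : (t / 6).toNat = n / 6 := by omega
      have h2 : t % 6 = ((n % 6 : ℕ) : Int) := by omega
      rw [h1, h2, ← hn]
      rw [dsum_pos 6 t.toNat (by omega) (by omega)]
      push_cast
      rw [hn]
      ring
    · rw [dif_neg h]
      have : n = 0 := by omega
      simp [this, dsum_zero]

lemma digitLoop9_eq (t cc : Int) (ht : 0 ≤ t) : digitLoop9 cc t = cc + dsum 9 t.toNat := by
  generalize hn : t.toNat = n
  induction n using Nat.strong_induction_on generalizing t cc with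
  | _ n ih =>
    rw [digitLoop9]
    by_cases h : 0 < t
    · rw [dif_pos h]
      rw [PySem.Int.mod_eq_emod_of_pos (by omega : (0:Int) < 9),
          PySem.Int.floordiv_eq_ediv_of_pos (by omega : (0:Int) < 9)]
      rw [ih ((t / 9).toNat) (by omega) _ _ (by omega) rfl]
      have h1 : (t / 9).toNat = n / 9 := by omega
      have h2 : t % 9 = ((n % 9 : ℕ) : Int) := by omega
      rw [h1, h2, ← hn]
      rw [dsum_pos 9 t.toNat (by omega) (by omega)]
      push_cast
      rw [hn]
      ring
    · rw [dif_neg h]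
      have : n = 0 := by omega
      simp [this, dsum_zero]

-- the split value both programs minimise over
def splitVal (T k : ℕ) : Int := ((dsum 6 k : ℕ) : Int) + ((dsum 9 (T - k) : ℕ) : Int)

lemma A_eq (N : Int) (h : 0 ≤ N) :
    editorial_pdf N =
      ((List.range (N.toNat + 1)).map (splitVal N.toNat)).foldl min N := by
  rw [editorial_pdf, PySem.List.pyRange_one, List.foldl_map, List.foldl_map]
  have hL : (N + 1 - 0).toNat = N.toNat + 1 := by omega
  rw [hL]
  apply PySem.List.foldl_congr_mem
  intro ans k hk
  rw [List.mem_range] at hk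
  simp only []
  rw [digitLoop6_eq _ _ (by omega), digitLoop9_eq _ _ (by omega : (0:Int) ≤ N - (0 + (k:Int)))]
  rw [splitVal]
  have e1 : ((0:Int) + (k:Int)).toNat = k := by omega
  have e2 : (N - ((0:Int) + (k:Int))).toNat = N.toNat - k := by omega
  rw [e1, e2, zero_add]

lemma zip_map (T : ℕ) (f6 f9 : ℕ → Int) :
    ((((List.range (T+1)).map f6).zip ((List.range (T+1)).map f9).reverse).map
        (fun ab => ab.1 + ab.2))
      = (List.range (T+1)).map (fun k => f6 k + f9 (T - k)) := by
  apply List.ext_getElem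
  · simp
  · intro i h1 h2
    simp only [List.length_map, List.length_range] at h2
    simp only [List.getElem_map, List.getElem_zip, List.getElem_reverse,
      List.length_map, List.length_range, List.getElem_range]
    have e : T + 1 - 1 - i = T - i := by omega
    rw [e]

lemma foldl_min_of_le (l : List Int) (a : Int) (h : ∀ y ∈ l, a ≤ y) : l.foldl min a = a := by
  induction l generalizing a with
  | nil => rfl
  | cons c t ih =>
    simp only [List.foldl_cons]
    rw [min_eq_left (h c (by simp))]
    exact ih a (fun y hy => h y (by simp [hy]))

lemma foldl_min_eq (l : List Int) (a m : Int) (hm : m ∈ l) (hmin : ∀ y ∈ l, m ≤ y)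
    (ha : m ≤ a) : l.foldl min a = m := by
  induction l generalizing a with
  | nil => simp at hm
  | cons c t ih =>
    simp only [List.foldl_cons]
    by_cases hct : m ∈ t
    · exact ih (min a c) hct (fun y hy => hmin y (by simp [hy]))
        (le_min ha (hmin c (by simp)))
    · have hc : c = m := by
        rcases List.mem_cons.mp hm with rfl | h2
        · rfl
        · exact absurd h2 hct
      subst hc
      rw [min_eq_right ha]
      exact foldl_min_of_le t c (fun y hy => hmin y (by simp [hy]))

lemma tbl_full (b T : ℕ) : tbl b (T+1) T = (List.range (T+1)).map (fun k => ((dsum b k : ℕ) : Int)) := by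
  apply List.map_congr_left
  intro k hk
  rw [List.mem_range] at hk
  rw [if_pos (by omega : k ≤ T)]

lemma fold_tbl6 (L M : ℕ) (hM : M < L) :
    (PySem.List.pyRange 1 ((M : ℕ) + 1) 1).foldl
      (fun s n => PySem.List.pySetD s n
        (PySem.Int.mod n 6 + PySem.List.pyGetD s (PySem.Int.floordiv n 6) 0))
      (List.replicate L (0 : Int)) = tbl 6 L M := by
  have h := fold_tbl 6 (by omega) L M hM
  simpa using h

lemma fold_tbl9 (L M : ℕ) (hM : M < L) :
    (PySem.List.pyRange 1 ((M : ℕ) + 1) 1).foldl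
      (fun s n => PySem.List.pySetD s n
        (PySem.Int.mod n 9 + PySem.List.pyGetD s (PySem.Int.floordiv n 9) 0))
      (List.replicate L (0 : Int)) = tbl 9 L M := by
  have h := fold_tbl 9 (by omega) L M hM
  simpa using h

theorem main (N : Int) (h : 0 ≤ N) : editorial_pdf N = editorial_pdf_alt N := by
  have hN : N = ((N.toNat : ℕ) : Int) := by omega
  set T := N.toNat with hT
  have hL : (N + 1).toNat = T + 1 := by omega
  rw [editorial_pdf_alt]
  simp only [hL]
  rw [show N + 1 = ((T : ℕ) : Int) + 1 by omega]
  rw [show (List.foldl (fun (st : List Int × List Int) n =>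
      (PySem.List.pySetD st.1 n (PySem.Int.mod n 6 + PySem.List.pyGetD st.1 (PySem.Int.floordiv n 6) 0),
       PySem.List.pySetD st.2 n (PySem.Int.mod n 9 + PySem.List.pyGetD st.2 (PySem.Int.floordiv n 9) 0)))
      (List.replicate (T+1) (0:Int), List.replicate (T+1) (0:Int)) (PySem.List.pyRange 1 ((T:Int) + 1)))
    = (List.foldl (fun s n => PySem.List.pySetD s n
          (PySem.Int.mod n 6 + PySem.List.pyGetD s (PySem.Int.floordiv n 6) 0))
          (List.replicate (T+1) 0) (PySem.List.pyRange 1 ((T:Int)+1)),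
       List.foldl (fun s n => PySem.List.pySetD s n
          (PySem.Int.mod n 9 + PySem.List.pyGetD s (PySem.Int.floordiv n 9) 0))
          (List.replicate (T+1) 0) (PySem.List.pyRange 1 ((T:Int)+1)))
    from PySem.List.foldl_prod_mk
      (fun s n => PySem.List.pySetD s n
        (PySem.Int.mod n 6 + PySem.List.pyGetD s (PySem.Int.floordiv n 6) 0))
      (fun s n => PySem.List.pySetD s n
        (PySem.Int.mod n 9 + PySem.List.pyGetD s (PySem.Int.floordiv n 9) 0))
      _ _ _]
  rw [fold_tbl6 (T+1) T (by omega), fold_tbl9 (T+1) T (by omega)]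
  rw [tbl_full, tbl_full, zip_map]
  have hlist : (List.range (T+1)).map (fun k => ((dsum 6 k : ℕ) : Int) + ((dsum 9 (T - k) : ℕ) : Int))
      = (List.range (T+1)).map (splitVal T) := rfl
  rw [hlist]
  cases hmin : PySem.List.min? ((List.range (T+1)).map (splitVal T)) (fun x => x) with
  | none =>
    exfalso
    rw [PySem.List.min?_eq_none_iff] at hmin
    have : ((List.range (T+1)).map (splitVal T)).length = T + 1 := by simp
    rw [hmin] at this
    simp at this
  | some m =>
    simp only []
    rw [A_eq N h]
    apply foldl_min_eq
    · exact PySem.List.min?_mem hmin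
    · exact fun y hy => PySem.List.min?_isMin hmin y hy
    · have hmem : splitVal T T ∈ (List.range (T+1)).map (splitVal T) := by
        apply List.mem_map_of_mem
        simp
      have h1 : m ≤ splitVal T T := PySem.List.min?_isMin hmin _ hmem
      have h2 : splitVal T T ≤ N := by
        rw [splitVal, Nat.sub_self, dsum_zero]
        have := dsum_le 6 T (by omega)
        omega
      exact h1.trans h2

-- ===== VERDICT (by name: the statement is the Claim_ definition above) =====
theorem editorial_pdf_spec : Claim_equal_editorial_pdf := by
  intro N _hdom hpre
  show editorial_pdf N = editorial_pdf_alt N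
  exact main N hpre
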